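-- pv_equiv track=rewrite | github.com/IngoMeyer441/tmux-easy-motion | scripts/easy_motion.py | convert_text_pos_to_row_col
-- ===== SOURCE A (Python) =====
-- def convert_text_pos_to_row_col(textpos, text):
--     # type: (int, str) -> Tuple[int, int]
--     lines = text.split("\n")
--     current_textpos = 0
--     row, col = 0, 0
--     for line in lines:
--         line_length = len(line)
--         if current_textpos + line_length > textpos:
--             col = textpos - current_textpos
--             break
--         row += 1
--         current_textpos += line_length + 1
--     else:
--         raise IndexError('The text position "{:d}" is out of range.'.format(textpos))
--
--     return (row, col)
-- ===== SOURCE B (Python) =====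
-- def _bisect_right(a, x):
--     # bisect.bisect_right written out (A imports no modules, so no 'import bisect')
--     lo, hi = 0, len(a)
--     while lo < hi:
--         mid = (lo + hi) // 2
--         if x < a[mid]:
--             hi = mid
--         else:
--             lo = mid + 1
--     return lo
--
--
-- def convert_text_pos_to_row_col(textpos, text):
--     # type: (int, str) -> Tuple[int, int]
--     starts, ends = [], []
--     offset = 0
--     for line in text.split("\n"):
--         starts.append(offset)
--         ends.append(offset + len(line))
--         offset += len(line) + 1
--     row = _bisect_right(ends, textpos)
--     if row == len(ends):
--         raise IndexError('The text position "{:d}" is out of range.'.format(textpos))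
--     return (row, textpos - starts[row])
-- ===== Notes on version B (the rewrite author's own statement) =====
-- stated objective: alternative
-- what changed: Replaces A's single accumulator scan over the lines with a build of start/end offset tables followed by a binary search (bisect_right) over the strictly increasing end offsets.
import Mathlib
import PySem

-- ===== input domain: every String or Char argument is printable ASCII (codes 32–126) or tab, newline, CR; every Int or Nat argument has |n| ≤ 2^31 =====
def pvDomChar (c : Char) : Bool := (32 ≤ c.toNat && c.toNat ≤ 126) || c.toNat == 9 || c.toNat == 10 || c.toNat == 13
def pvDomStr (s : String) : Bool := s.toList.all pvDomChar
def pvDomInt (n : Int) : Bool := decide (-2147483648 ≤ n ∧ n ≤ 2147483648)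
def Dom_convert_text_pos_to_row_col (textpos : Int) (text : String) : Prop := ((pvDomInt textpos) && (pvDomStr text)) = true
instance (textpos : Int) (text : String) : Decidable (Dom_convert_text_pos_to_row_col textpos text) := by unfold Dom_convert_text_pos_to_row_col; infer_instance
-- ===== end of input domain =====

-- B replaces A's accumulator scan over the lines with offset tables plus a binary search; same result, similar cost.

-- ===== PORT A =====
-- the for/else loop of A over the split lines, carrying (current_textpos, row);
-- the [] case is Python's 'else: raise IndexError' (excluded by Pre_), junk value there
def pvScanA (textpos : Int) : List (List Char) → Int → Int → Int × Int
  | [], _cur, row => (row, 0)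
  | line :: rest, cur, row =>
    if cur + (line.length : Int) > textpos then (row, textpos - cur)
    else pvScanA textpos rest (cur + (line.length : Int) + 1) (row + 1)

def convert_text_pos_to_row_col (textpos : Int) (text : String) : Int × Int :=
  pvScanA textpos (PySem.Chars.splitOn text.toList ['\n']) 0 0

-- ===== PORT B =====
def convert_text_pos_to_row_col_alt (textpos : Int) (text : String) : Int × Int :=
  let st := (PySem.Chars.splitOn text.toList ['\n']).foldl
      (fun (st : List Int × List Int × Int) line =>
        (st.1 ++ [st.2.2], st.2.1 ++ [st.2.2 + (line.length : Int)], st.2.2 + (line.length : Int) + 1))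
      ([], [], 0)
  let starts := st.1
  let ends := st.2.1
  let row := PySem.List.bisectRight ends textpos
  if row = ends.length then (-1, -1)  -- Python: raise IndexError (excluded by Pre_)
  else ((row : Int), textpos - starts.getD row 0)

-- ===== PRECONDITION & SPEC =====
-- Pre_ excludes exactly the inputs where A raises IndexError: positions at or past the end of the text.
def Pre_convert_text_pos_to_row_col (textpos : Int) (text : String) : Prop :=
  textpos < (PySem.Str.len text : Int)
instance (textpos : Int) (text : String) : Decidable (Pre_convert_text_pos_to_row_col textpos text) := by unfold Pre_convert_text_pos_to_row_col; infer_instance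

def pvWitness_convert_text_pos_to_row_col : Int × String := (4, "ab\ncd")

def Spec_convert_text_pos_to_row_col (textpos : Int) (text : String) (out : Int × Int) : Prop := out = convert_text_pos_to_row_col_alt textpos text
instance (textpos : Int) (text : String) (out : Int × Int) : Decidable (Spec_convert_text_pos_to_row_col textpos text out) := by unfold Spec_convert_text_pos_to_row_col; infer_instance

-- ===== CLAIM (what is proved, stated in full; the proofs are below) =====
def Claim_equal_convert_text_pos_to_row_col : Prop := ∀ (textpos : Int) (text : String), Dom_convert_text_pos_to_row_col textpos text → Pre_convert_text_pos_to_row_col textpos text → Spec_convert_text_pos_to_row_col textpos text (convert_text_pos_to_row_col textpos text)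

-- ===== LEMMAS AND PROOFS =====

-- structural characterization of Python's text.split("\n")
def pvSplitNl : List Char → List (List Char)
  | [] => [[]]
  | c :: cs => if c = '\n' then [] :: pvSplitNl cs else (pvSplitNl cs).modifyHead (c :: ·)

lemma pvSplitNl_ne_nil (l : List Char) : pvSplitNl l ≠ [] := by
  cases l with
  | nil => simp [pvSplitNl]
  | cons c cs =>
    simp only [pvSplitNl]
    split
    · simp
    · cases h : pvSplitNl cs with
      | nil => exact absurd h (pvSplitNl_ne_nil cs)
      | cons a t => simp [List.modifyHead]

lemma pvModifyHead_id (xs : List (List Char)) : xs.modifyHead (fun x => x) = xs := by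
  cases xs <;> simp [List.modifyHead]

lemma pvGo_spec (fuel : Nat) (l cur : List Char) (acc : List (List Char)) (hf : l.length ≤ fuel) :
    PySem.Chars.splitOn.go ['\n'] fuel l cur acc
      = acc.reverse ++ (pvSplitNl l).modifyHead (cur.reverse ++ ·) := by
  induction fuel generalizing l cur acc with
  | zero =>
    cases l with
    | nil => simp [PySem.Chars.splitOn.go, pvSplitNl]
    | cons c cs => simp at hf
  | succ f ih =>
    cases l with
    | nil => simp [PySem.Chars.splitOn.go, pvSplitNl]
    | cons c cs =>
      simp only [List.length_cons, Nat.succ_le_succ_iff] at hf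
      by_cases hc : c = '\n'
      · subst hc
        have : List.isPrefixOf ['\n'] ('\n' :: cs) = true := by simp [List.isPrefixOf]
        simp only [PySem.Chars.splitOn.go, this, if_pos]
        rw [ih _ _ _ (by simpa using hf)]
        simp [pvSplitNl, pvModifyHead_id]
      · have : List.isPrefixOf ['\n'] (c :: cs) = false := by
          simp only [List.isPrefixOf, Bool.and_true, beq_eq_false_iff_ne, ne_eq]
          exact fun h => hc h.symm
        simp only [PySem.Chars.splitOn.go, this]
        rw [if_neg (by simp), ih _ _ _ hf]
        simp only [pvSplitNl, if_neg hc]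
        cases h : pvSplitNl cs with
        | nil => exact absurd h (pvSplitNl_ne_nil cs)
        | cons a t => simp [List.modifyHead]

lemma pvSplitOn_newline (l : List Char) : PySem.Chars.splitOn l ['\n'] = pvSplitNl l := by
  rw [PySem.Chars.splitOn, pvGo_spec (l.length + 1) l [] [] (by omega)]
  cases h : pvSplitNl l with
  | nil => exact absurd h (pvSplitNl_ne_nil l)
  | cons a t => simp [List.modifyHead]

-- the tables B builds, as structural recursions
def pvStarts : List (List Char) → Int → List Int
  | [], _ => []
  | line :: rest, off => off :: pvStarts rest (off + (line.length : Int) + 1)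

def pvEnds : List (List Char) → Int → List Int
  | [], _ => []
  | line :: rest, off => (off + (line.length : Int)) :: pvEnds rest (off + (line.length : Int) + 1)

lemma pvLength_starts (lines : List (List Char)) (off : Int) :
    (pvStarts lines off).length = lines.length := by
  induction lines generalizing off with
  | nil => rfl
  | cons a t ih => simp [pvStarts, ih]

lemma pvLength_ends (lines : List (List Char)) (off : Int) :
    (pvEnds lines off).length = lines.length := by
  induction lines generalizing off with
  | nil => rfl
  | cons a t ih => simp [pvEnds, ih]

lemma pvFold_eq (lines : List (List Char)) (s e : List Int) (off : Int) :
    lines.foldl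
      (fun (st : List Int × List Int × Int) line =>
        (st.1 ++ [st.2.2], st.2.1 ++ [st.2.2 + (line.length : Int)], st.2.2 + (line.length : Int) + 1))
      (s, e, off)
      = (s ++ pvStarts lines off, e ++ pvEnds lines off,
         off + ((lines.map (fun p => (p.length : Int) + 1)).sum)) := by
  induction lines generalizing s e off with
  | nil => simp [pvStarts, pvEnds]
  | cons a t ih =>
    simp only [List.foldl_cons, ih, pvStarts, pvEnds, List.map_cons, List.sum_cons]
    refine Prod.ext (by simp) (Prod.ext (by simp) ?_)
    simp; ring

lemma pvEnds_mem_le (lines : List (List Char)) (off : Int) :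
    ∀ x ∈ pvEnds lines off, off ≤ x := by
  induction lines generalizing off with
  | nil => simp [pvEnds]
  | cons a t ih =>
    intro x hx
    have hn : (0 : Int) ≤ (a.length : Int) := Int.natCast_nonneg _
    simp only [pvEnds, List.mem_cons] at hx
    rcases hx with rfl | hx
    · omega
    · have := ih (off + (a.length : Int) + 1) x hx
      omega

lemma pvEnds_sorted (lines : List (List Char)) (off : Int) :
    List.Pairwise (· ≤ ·) (pvEnds lines off) := by
  induction lines generalizing off with
  | nil => simp [pvEnds]
  | cons a t ih =>
    simp only [pvEnds, List.pairwise_cons]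
    refine ⟨fun y hy => ?_, ih _⟩
    have := pvEnds_mem_le t (off + (a.length : Int) + 1) y hy
    omega

lemma pvEnds_last (lines : List (List Char)) (off : Int) (h : lines ≠ []) :
    (pvEnds lines off).getD (lines.length - 1) 0
      = off + ((lines.map (fun p => (p.length : Int) + 1)).sum) - 1 := by
  induction lines generalizing off with
  | nil => exact absurd rfl h
  | cons a t ih =>
    cases t with
    | nil => simp [pvEnds]; ring
    | cons b u =>
      have hne : (b :: u : List (List Char)) ≠ [] := by simp
      have hlen : (b :: u : List (List Char)).length - 1 + 1 = (a :: b :: u : List (List Char)).length - 1 := by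
        simp
      have hunf : pvEnds (a :: b :: u) off
          = (off + (a.length : Int)) :: pvEnds (b :: u) (off + (a.length : Int) + 1) := rfl
      rw [hunf, ← hlen, List.getD_cons_succ, ih _ hne]
      simp only [List.map_cons, List.sum_cons]
      ring

lemma pvSum_splitNl (l : List Char) :
    ((pvSplitNl l).map (fun p => (p.length : Int) + 1)).sum = (l.length : Int) + 1 := by
  induction l with
  | nil => simp [pvSplitNl]
  | cons c cs ih =>
    simp only [pvSplitNl]
    split
    · simp only [List.map_cons, List.sum_cons, ih]; simp; ring
    · cases h : pvSplitNl cs with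
      | nil => exact absurd h (pvSplitNl_ne_nil cs)
      | cons a t =>
        rw [h] at ih
        simp only [List.modifyHead, List.map_cons, List.sum_cons, List.length_cons] at ih ⊢
        push_cast at ih ⊢
        omega

lemma pvScan_char (textpos : Int) (lines : List (List Char)) (off row : Int) (k : Nat)
    (hk : k < lines.length)
    (h2 : ∀ j < k, (pvEnds lines off).getD j 0 ≤ textpos)
    (h3 : textpos < (pvEnds lines off).getD k 0) :
    pvScanA textpos lines off row = (row + (k : Int), textpos - (pvStarts lines off).getD k 0) := by
  induction lines generalizing off row k with
  | nil => simp at hk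
  | cons a t ih =>
    cases k with
    | zero =>
      simp only [pvEnds, List.getD_cons_zero] at h3
      simp [pvScanA, if_pos (by omega : off + (a.length : Int) > textpos), pvStarts]
    | succ k' =>
      have h0 : (off + (a.length : Int)) ≤ textpos := by
        have := h2 0 (Nat.succ_pos k')
        simpa [pvEnds] using this
      simp only [pvScanA, if_neg (by omega : ¬ off + (a.length : Int) > textpos)]
      have hk' : k' < t.length := by simpa using hk
      have h2' : ∀ j < k', (pvEnds t (off + (a.length : Int) + 1)).getD j 0 ≤ textpos := by
        intro j hj
        have := h2 (j + 1) (by omega)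
        simpa [pvEnds] using this
      have h3' : textpos < (pvEnds t (off + (a.length : Int) + 1)).getD k' 0 := by
        simpa [pvEnds] using h3
      rw [ih _ _ _ hk' h2' h3']
      simp only [pvStarts, List.getD_cons_succ]
      refine Prod.ext ?_ rfl
      push_cast; ring

-- ===== VERDICT (by name: the statement is the Claim_ definition above) =====
theorem convert_text_pos_to_row_col_spec : Claim_equal_convert_text_pos_to_row_col := by
  intro textpos text _dom hpre
  unfold Spec_convert_text_pos_to_row_col
  unfold Pre_convert_text_pos_to_row_col at hpre
  rw [PySem.Str.len_eq] at hpre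
  unfold convert_text_pos_to_row_col convert_text_pos_to_row_col_alt
  rw [pvSplitOn_newline]
  set l := text.toList with hl
  set lines := pvSplitNl l with hlines
  rw [pvFold_eq]
  simp only [List.nil_append]
  set e := pvEnds lines 0 with he
  set s := pvStarts lines 0 with hs
  set k := PySem.List.bisectRight e textpos with hk
  obtain ⟨hkle, hlt, hgt⟩ := PySem.List.bisectRight_spec e textpos (pvEnds_sorted lines 0)
  have hlines_ne : lines ≠ [] := pvSplitNl_ne_nil l
  have hlenE : e.length = lines.length := pvLength_ends lines 0
  have hlenS : s.length = lines.length := pvLength_starts lines 0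
  have hlast : e.getD (lines.length - 1) 0 = (l.length : Int) := by
    rw [he, pvEnds_last lines 0 hlines_ne, hlines, pvSum_splitNl]
    ring
  have hlpos : 0 < lines.length := List.length_pos_of_ne_nil hlines_ne
  have hklt : k < e.length := by
    rcases Nat.lt_or_ge k e.length with h | h
    · exact h
    · exfalso
      have hidx : lines.length - 1 < e.length := by omega
      have := hlt (lines.length - 1) hidx (by omega)
      rw [List.getD_eq_getElem e 0 hidx] at hlast
      omega
  have h2 : ∀ j < k, e.getD j 0 ≤ textpos := by
    intro j hj
    have hjlt : j < e.length := by omega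
    rw [List.getD_eq_getElem e 0 hjlt]
    exact hlt j hjlt hj
  have h3 : textpos < e.getD k 0 := by
    rw [List.getD_eq_getElem e 0 hklt]
    exact hgt k hklt (le_refl k)
  rw [pvScan_char textpos lines 0 0 k (by omega) h2 h3]
  rw [if_neg (by omega : ¬ k = e.length)]
  simp only [hs]
  simp
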